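-- pv_equiv track=rewrite | github.com/arpit-kapoor/streamflow-floods | src/event_metrics.py | _merge_close_runs
-- ===== SOURCE A (Python) =====
-- from typing import List, Dict, Tuple, Optional
--
-- def _merge_close_runs(runs: List[Tuple[int, int]], max_gap: int) -> List[Tuple[int, int]]:
--     """
--     Merge runs separated by gaps <= max_gap timesteps.
--
--     Parameters:
--     -----------
--     runs : list of (start, end) tuples
--         Must be sorted by start time
--     max_gap : int
--         Maximum gap (in timesteps) to merge across
--
--     Returns:
--     --------
--     list of merged (start, end) tuples
--     """
--     if not runs:
--         return []
--
--     merged = [list(runs[0])]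
--     for s, e in runs[1:]:
--         prev_s, prev_e = merged[-1]
--         gap = s - prev_e - 1
--         if gap <= max_gap:
--             merged[-1][1] = e
--         else:
--             merged.append([s, e])
--
--     return [(s, e) for s, e in merged]
-- ===== SOURCE B (Python) =====
-- from typing import List, Tuple
--
-- def _combine(L: List[Tuple[int, int]], R: List[Tuple[int, int]], max_gap: int) -> List[Tuple[int, int]]:
--     # L and R are nonempty merged results of adjacent halves; the end of L's
--     # last interval is the end of the last original run in the left half, so
--     # the merge decision at the seam is the same one A makes there.
--     if R[0][0] - L[-1][1] - 1 <= max_gap: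
--         return L[:-1] + [(L[-1][0], R[0][1])] + R[1:]
--     return L + R
--
-- def _merge_close_runs(runs: List[Tuple[int, int]], max_gap: int) -> List[Tuple[int, int]]:
--     # Divide and conquer: merge each half recursively, then join at the seam.
--     n = len(runs)
--     if n == 0:
--         return []
--     if n == 1:
--         return [(runs[0][0], runs[0][1])]
--     mid = n // 2
--     return _combine(_merge_close_runs(runs[:mid], max_gap),
--                     _merge_close_runs(runs[mid:], max_gap), max_gap)
-- ===== Notes on version B (the rewrite author's own statement) =====
-- stated objective: alternative
-- what changed: B is a divide-and-conquer: it recursively merges each half of the run list and joins the two merged halves with a combine step at the seam, instead of A's single left-to-right pass that mutates the last merged interval; correct because the merge decision depends only on consecutive original runs, making the merge combinable at any split point.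
import Mathlib
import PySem

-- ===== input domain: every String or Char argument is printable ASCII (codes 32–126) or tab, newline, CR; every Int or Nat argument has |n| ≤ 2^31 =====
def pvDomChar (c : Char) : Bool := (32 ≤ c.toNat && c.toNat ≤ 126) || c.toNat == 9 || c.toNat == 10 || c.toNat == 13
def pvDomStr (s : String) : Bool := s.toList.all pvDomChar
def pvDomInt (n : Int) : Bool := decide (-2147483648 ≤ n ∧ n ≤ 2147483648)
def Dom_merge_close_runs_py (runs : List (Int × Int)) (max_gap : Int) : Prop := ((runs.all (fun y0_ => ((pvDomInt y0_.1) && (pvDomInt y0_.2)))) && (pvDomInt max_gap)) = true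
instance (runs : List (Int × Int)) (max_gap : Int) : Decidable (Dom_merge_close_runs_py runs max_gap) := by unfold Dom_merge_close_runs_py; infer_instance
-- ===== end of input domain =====

-- B replaces A's single left-to-right merging pass by a divide-and-conquer
-- (merge each half recursively, combine at the seam); same result, proved below.

-- ===== PORT A =====
-- A keeps `merged` with the last interval mutated in place; ported with the
-- list held in reverse (head = merged[-1]) and reversed at the end.
-- stepA is the literal loop body of A's for-loop.
def stepA (max_gap : Int) (acc : List (Int × Int)) (se : Int × Int) : List (Int × Int) :=
  match acc with
  | (prev_s, prev_e) :: t =>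
      if se.1 - prev_e - 1 ≤ max_gap then (prev_s, se.2) :: t
      else (se.1, se.2) :: (prev_s, prev_e) :: t
  | [] => [(se.1, se.2)]   -- unreachable: merged starts nonempty

def merge_close_runs_py (runs : List (Int × Int)) (max_gap : Int) : List (Int × Int) :=
  match runs with
  | [] => []
  | r0 :: rest =>
    let merged := rest.foldl (stepA max_gap) [(r0.1, r0.2)]
    merged.reverse.map (fun p => (p.1, p.2))

-- ===== PORT B =====
-- _combine: L and R are nonempty in every call B makes, so Python's L[-1]/R[0]
-- are ported as getLastD/headD (the default is never read).
def combB (max_gap : Int) (L R : List (Int × Int)) : List (Int × Int) :=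
  if (R.headD (0, 0)).1 - (L.getLastD (0, 0)).2 - 1 ≤ max_gap then
    L.dropLast ++ [((L.getLastD (0, 0)).1, (R.headD (0, 0)).2)] ++ R.tail
  else L ++ R

def merge_close_runs_py_alt (runs : List (Int × Int)) (max_gap : Int) : List (Int × Int) :=
  match runs with
  | [] => []
  | [r] => [(r.1, r.2)]
  | r1 :: r2 :: rest =>
    let l := r1 :: r2 :: rest
    let mid := l.length / 2
    combB max_gap (merge_close_runs_py_alt (l.take mid) max_gap)
                  (merge_close_runs_py_alt (l.drop mid) max_gap)
termination_by runs.length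
decreasing_by
  · simp [List.length_take]; omega
  · simp [List.length_drop]; omega

-- ===== PRECONDITION & SPEC =====
def Spec_merge_close_runs_py (runs : List (Int × Int)) (max_gap : Int) (out : List (Int × Int)) : Prop := out = merge_close_runs_py_alt runs max_gap
instance (runs : List (Int × Int)) (max_gap : Int) (out : List (Int × Int)) : Decidable (Spec_merge_close_runs_py runs max_gap out) := by unfold Spec_merge_close_runs_py; infer_instance

-- ===== CLAIM (what is proved, stated in full; the proofs are below) =====
def Claim_equal_merge_close_runs_py : Prop := ∀ (runs : List (Int × Int)) (max_gap : Int), Dom_merge_close_runs_py runs max_gap → Spec_merge_close_runs_py runs max_gap (merge_close_runs_py runs max_gap)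

-- ===== LEMMAS AND PROOFS =====

-- Reference recursion both ports are reduced to: carry (start, end-so-far).
def mergeRec (g : Int) : Int × Int → List (Int × Int) → List (Int × Int)
  | cur, [] => [cur]
  | cur, se :: rs =>
      if se.1 - cur.2 - 1 ≤ g then mergeRec g (cur.1, se.2) rs
      else cur :: mergeRec g (se.1, se.2) rs

def refAll (g : Int) : List (Int × Int) → List (Int × Int)
  | [] => []
  | r :: rs => mergeRec g r rs

lemma foldA_eq (g : Int) : ∀ (rs : List (Int × Int)) (ps pe : Int) (t : List (Int × Int)),
    ((rs.foldl (stepA g) ((ps, pe) :: t)).reverse.map (fun p => (p.1, p.2)))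
      = t.reverse.map (fun p => (p.1, p.2)) ++ mergeRec g (ps, pe) rs := by
  intro rs
  induction rs with
  | nil => intro ps pe t; simp [mergeRec]
  | cons se rs ih =>
      intro ps pe t
      by_cases h : se.1 - pe - 1 ≤ g
      · simp only [List.foldl_cons, stepA, h, if_true, mergeRec, ih]
      · simp only [List.foldl_cons, stepA, if_neg h, mergeRec, ih]
        simp

-- the head of mergeRec g (a,b) rs is (a, e) with e,t independent of a
lemma mergeRec_shape (g : Int) : ∀ (rs : List (Int × Int)) (b : Int),
    ∃ e t, ∀ a, mergeRec g (a, b) rs = (a, e) :: t := by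
  intro rs
  induction rs with
  | nil => intro b; exact ⟨b, [], fun a => rfl⟩
  | cons se rs ih =>
      intro b
      by_cases h : se.1 - b - 1 ≤ g
      · obtain ⟨e, t, he⟩ := ih se.2
        exact ⟨e, t, fun a => by simp [mergeRec, h, he a]⟩
      · exact ⟨b, mergeRec g (se.1, se.2) rs, fun a => by simp [mergeRec, h]⟩

lemma mergeRec_ne_nil (g : Int) (cur : Int × Int) (rs : List (Int × Int)) :
    mergeRec g cur rs ≠ [] := by
  induction rs generalizing cur with
  | nil => simp [mergeRec]
  | cons se rs ih =>
      simp only [mergeRec]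
      split_ifs
      · exact ih _
      · simp

lemma combB_cons (g : Int) (c : Int × Int) (L R : List (Int × Int)) (hL : L ≠ []) :
    combB g (c :: L) R = c :: combB g L R := by
  obtain ⟨l0, L', rfl⟩ := List.exists_cons_of_ne_nil hL
  simp only [combB, List.getLastD_cons, List.dropLast_cons_of_ne_nil (by simp : l0 :: L' ≠ [])]
  split_ifs <;> simp

-- splitting lemma: merging rs ++ ys = combine (merging rs) (merging ys), ys nonempty
lemma mergeRec_append (g : Int) : ∀ (rs ys : List (Int × Int)) (cur : Int × Int), ys ≠ [] →
    mergeRec g cur (rs ++ ys) = combB g (mergeRec g cur rs) (refAll g ys) := by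
  intro rs
  induction rs with
  | nil =>
      intro ys cur hy
      obtain ⟨y, ys', rfl⟩ := List.exists_cons_of_ne_nil hy
      obtain ⟨e, t, he⟩ := mergeRec_shape g ys' y.2
      have hy' : mergeRec g y ys' = (y.1, e) :: t := by
        have := he y.1; simpa using this
      simp only [List.nil_append, mergeRec, refAll, hy']
      by_cases h : y.1 - cur.2 - 1 ≤ g
      · simp [combB, h, he cur.1]
      · simp [combB, h]
  | cons r rs ih =>
      intro ys cur hy
      by_cases h : r.1 - cur.2 - 1 ≤ g
      · simp only [List.cons_append, mergeRec, h, if_true]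
        exact ih ys (cur.1, r.2) hy
      · simp only [List.cons_append, mergeRec, h, if_false]
        rw [ih ys (r.1, r.2) hy, combB_cons g cur _ _ (mergeRec_ne_nil g _ rs)]

lemma refAll_append (g : Int) (xs ys : List (Int × Int)) (hx : xs ≠ []) (hy : ys ≠ []) :
    refAll g (xs ++ ys) = combB g (refAll g xs) (refAll g ys) := by
  obtain ⟨x, xs', rfl⟩ := List.exists_cons_of_ne_nil hx
  simp only [List.cons_append, refAll]
  exact mergeRec_append g xs' ys x hy

lemma alt_eq_refAll (g : Int) : ∀ (runs : List (Int × Int)),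
    merge_close_runs_py_alt runs g = refAll g runs := by
  intro runs
  induction runs using merge_close_runs_py_alt.induct with
  | case1 => simp [merge_close_runs_py_alt, refAll]
  | case2 r => simp [merge_close_runs_py_alt, refAll, mergeRec]
  | case3 r1 r2 rest l mid ih1 ih2 =>
      have hlen : l.length = rest.length + 2 := by simp [l]
      have ht : List.take mid l ≠ [] := by
        intro h; have := congrArg List.length h; simp [mid, hlen] at this
      have hd : List.drop mid l ≠ [] := by
        intro h; have := congrArg List.length h; simp [mid, hlen] at this; omega
      rw [merge_close_runs_py_alt]
      rw [ih1, ih2, ← refAll_append g _ _ ht hd, List.take_append_drop]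

-- ===== VERDICT (by name: the statement is the Claim_ definition above) =====
theorem merge_close_runs_py_spec : Claim_equal_merge_close_runs_py := by
  intro runs max_gap _
  unfold Spec_merge_close_runs_py
  rw [alt_eq_refAll]
  cases runs with
  | nil => rfl
  | cons r0 rest =>
      unfold merge_close_runs_py
      simp only []
      rw [foldA_eq max_gap rest r0.1 r0.2 []]
      simp [refAll]
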